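-- pv_equiv track=rewrite | github.com/slackjawed12/codetest | LeetCode/Easy/1784-check-if-binary-string-has-at-most-one-segment-of-ones/1784-check-if-binary-string-has-at-most-one-segment-of-ones.py | checkOnesSegment
-- ===== SOURCE A (Python) =====
-- def checkOnesSegment(s: str) -> bool:
--     first = True
--     for c in s:
--         if first:
--             if c == '1':
--                 continue
--             else:
--                 first = False
--         else:
--             if c == '1':
--                 return False
--
--     return True
-- ===== SOURCE B (Python) =====
-- def checkOnesSegment(s: str) -> bool:
--     # the '1's form one segment starting at index 0  <=>  the highest index of a '1'
--     # is exactly (number of '1's) - 1; with no '1' both sides are -1/0 and it holds.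
--     return s.rfind('1') + 1 == s.count('1')
-- ===== Notes on version B (the rewrite author's own statement) =====
-- stated objective: faster
-- what changed: Replaces A's Python-level state-flag character loop with an arithmetic comparison of two aggregates: the property holds iff s.rfind('1') + 1 equals s.count('1') (all ones occupy a prefix exactly when the last one's index + 1 is the number of ones); both aggregates are single C-level builtin scans.
import Mathlib
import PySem

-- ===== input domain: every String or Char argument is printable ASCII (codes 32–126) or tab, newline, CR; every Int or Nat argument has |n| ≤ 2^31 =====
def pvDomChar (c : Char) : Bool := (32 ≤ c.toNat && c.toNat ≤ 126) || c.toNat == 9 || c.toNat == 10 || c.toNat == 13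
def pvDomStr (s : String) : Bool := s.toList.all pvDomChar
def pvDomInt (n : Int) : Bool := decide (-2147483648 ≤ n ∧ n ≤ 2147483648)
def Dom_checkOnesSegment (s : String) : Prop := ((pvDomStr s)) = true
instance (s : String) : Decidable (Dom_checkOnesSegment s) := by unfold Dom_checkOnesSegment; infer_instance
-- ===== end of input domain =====

-- B replaces A's state-flag character loop with an arithmetic comparison of two aggregates:
-- the last index of '1' plus one must equal the number of '1's (same O(n) cost, different decomposition).


-- ===== PORT A =====
-- the for-loop with the `first` flag and the early `return False`
def checkOnesSegmentLoopA : List Char → Bool → Bool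
  | [], _ => true
  | c :: cs, first =>
    if first then
      if c = '1' then checkOnesSegmentLoopA cs true
      else checkOnesSegmentLoopA cs false
    else
      if c = '1' then false
      else checkOnesSegmentLoopA cs first

def checkOnesSegment (s : String) : Bool := checkOnesSegmentLoopA s.toList true

-- ===== PORT B =====
-- s.rfind('1'): highest index of '1', -1 if absent — hand port, exact for a one-character needle
def pyRfind1 (l : List Char) : Int :=
  match l.reverse.findIdx? (· = '1') with
  | some i => (l.length : Int) - 1 - (i : Int)
  | none => -1

-- s.count('1') for a one-character needle is the plain character count
def checkOnesSegment_alt (s : String) : Bool :=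
  decide (pyRfind1 s.toList + 1 = (s.toList.count '1' : Int))

-- ===== PRECONDITION & SPEC =====
def Spec_checkOnesSegment (s : String) (out : Bool) : Prop := out = checkOnesSegment_alt s
instance (s : String) (out : Bool) : Decidable (Spec_checkOnesSegment s out) := by unfold Spec_checkOnesSegment; infer_instance

-- ===== CLAIM (what is proved, stated in full; the proofs are below) =====
def Claim_equal_checkOnesSegment : Prop := ∀ (s : String), Dom_checkOnesSegment s → Spec_checkOnesSegment s (checkOnesSegment s)

-- ===== LEMMAS AND PROOFS =====

theorem pyRfind1_nil : pyRfind1 [] = -1 := rfl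

theorem pyRfind1_cons (c : Char) (cs : List Char) :
    pyRfind1 (c :: cs) =
      if '1' ∈ cs then pyRfind1 cs + 1
      else if c = '1' then 0 else -1 := by
  unfold pyRfind1
  rw [List.reverse_cons, List.findIdx?_append]
  by_cases h : '1' ∈ cs
  · have hs : (List.findIdx? (fun x => decide (x = '1')) cs.reverse).isSome := by
      rw [List.findIdx?_isSome, List.any_eq_true]
      exact ⟨'1', List.mem_reverse.mpr h, by simp⟩
    obtain ⟨i, hi⟩ := Option.isSome_iff_exists.mp hs
    have hlt : i < cs.reverse.length := (List.findIdx?_eq_some_iff_findIdx_eq.mp hi).1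
    simp only [List.length_reverse] at hlt
    simp only [hi, Option.some_or, h, if_true, List.length_cons]
    push_cast
    omega
  · have hnone : List.findIdx? (fun x => decide (x = '1')) cs.reverse = none := by
      rw [List.findIdx?_eq_none_iff]
      intro x hx
      simp only [decide_eq_false_iff_not]
      intro hx1
      exact h (hx1 ▸ List.mem_reverse.mp hx)
    simp only [hnone, Option.none_or, h, if_false]
    by_cases hc : c = '1'
    · subst hc
      have h1 : List.findIdx? (fun x => decide (x = '1')) ['1'] = some 0 := rfl
      rw [h1]
      simp [List.length_reverse]
    · have h1 : List.findIdx? (fun x => decide (x = '1')) [c] = none := by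
        rw [List.findIdx?_eq_none_iff]
        intro x hx
        simp only [List.mem_singleton] at hx
        subst hx
        simp [hc]
      rw [h1]
      simp [hc]

-- the count never reaches past the last '1'
theorem count_le_rfind_succ (l : List Char) (h : '1' ∈ l) :
    (l.count '1' : Int) ≤ pyRfind1 l + 1 := by
  induction l with
  | nil => simp at h
  | cons c cs ih =>
    rw [pyRfind1_cons, List.count_cons]
    by_cases hcs : '1' ∈ cs
    · have hle := ih hcs
      by_cases hc : c = '1' <;> simp only [hcs, if_true, hc] <;> push_cast <;> simp <;> omega
    · have hc : c = '1' := by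
        rcases List.mem_cons.mp h with h1 | h1
        · exact h1.symm
        · exact absurd h1 hcs
      have h0 : cs.count '1' = 0 := List.count_eq_zero.mpr hcs
      simp [hcs, hc, h0]

-- with the flag off, A's loop returns true iff no '1' remains
theorem loopA_false (l : List Char) :
    checkOnesSegmentLoopA l false = !(l.contains '1') := by
  induction l with
  | nil => simp [checkOnesSegmentLoopA]
  | cons c cs ih =>
    by_cases h : c = '1'
    · simp [checkOnesSegmentLoopA, h, List.contains_eq_mem]
    · simp [checkOnesSegmentLoopA, h, ih, List.contains_eq_mem]
      exact fun _ e => h e.symm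

-- with no '1' left, A's loop (flag on) returns true
theorem loopA_true_of_not_mem (l : List Char) (h : '1' ∉ l) :
    checkOnesSegmentLoopA l true = true := by
  cases l with
  | nil => rfl
  | cons c cs =>
    have hc : ¬ c = '1' := fun e => h (e ▸ List.mem_cons_self)
    have hcs : '1' ∉ cs := fun m => h (List.mem_cons_of_mem _ m)
    have hstep : checkOnesSegmentLoopA (c :: cs) true = checkOnesSegmentLoopA cs false := by
      simp [checkOnesSegmentLoopA, hc]
    rw [hstep, loopA_false]
    simpa [List.contains_eq_mem] using hcs

theorem main_eq (l : List Char) :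
    checkOnesSegmentLoopA l true = decide (pyRfind1 l + 1 = (l.count '1' : Int)) := by
  induction l with
  | nil => simp [checkOnesSegmentLoopA, pyRfind1_nil]
  | cons c cs ih =>
    rw [pyRfind1_cons]
    by_cases hc : c = '1'
    · subst hc
      have hcount : ((('1' :: cs).count '1' : Nat) : Int) = (cs.count '1' : Int) + 1 := by
        simp
      rw [hcount]
      by_cases hcs : '1' ∈ cs
      · simp only [hcs, if_true]
        have hloop : checkOnesSegmentLoopA ('1' :: cs) true = checkOnesSegmentLoopA cs true := by
          simp [checkOnesSegmentLoopA]
        rw [hloop, ih, decide_eq_decide]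
        omega
      · have h0 : cs.count '1' = 0 := List.count_eq_zero.mpr hcs
        have hloop : checkOnesSegmentLoopA ('1' :: cs) true = checkOnesSegmentLoopA cs true := by
          simp [checkOnesSegmentLoopA]
        rw [hloop, loopA_true_of_not_mem cs hcs]
        simp [hcs, h0]
    · have hloop : checkOnesSegmentLoopA (c :: cs) true = checkOnesSegmentLoopA cs false := by
        simp [checkOnesSegmentLoopA, hc]
      have hcount : ((((c :: cs).count '1' : Nat)) : Int) = (cs.count '1' : Int) := by
        simp [hc]
      rw [hloop, loopA_false, hcount]
      by_cases hcs : '1' ∈ cs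
      · have hle := count_le_rfind_succ cs hcs
        have hcont : cs.contains '1' = true := by simpa [List.contains_eq_mem] using hcs
        simp only [hcs, if_true, hcont, Bool.not_true]
        symm
        rw [decide_eq_false_iff_not]
        omega
      · have h0 : cs.count '1' = 0 := List.count_eq_zero.mpr hcs
        have hcont : cs.contains '1' = false := by simpa [List.contains_eq_mem] using hcs
        simp [hcs, h0, hc]

-- ===== VERDICT (by name: the statement is the Claim_ definition above) =====
theorem checkOnesSegment_spec : Claim_equal_checkOnesSegment := by
  intro s _
  show checkOnesSegment s = checkOnesSegment_alt s
  unfold checkOnesSegment checkOnesSegment_alt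
  exact main_eq s.toList
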